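/- GENERATED by farm/mkstatement.py from design/units.tsv (unit `sin`) and the Specs of Vorbis/Spec/*.lean — do not edit.
   THE STATEMENT of the proof unit `sin`: the function `sin` (3 instructions) satisfies its contract,
   given the contracts of its callees. What the names mean: Vorbis/Spec/Basic.lean. The theorem to prove:
   `theorem sin_ok : Vorbis.Spec.sin.Statement`. -/
import Vorbis.Spec.Libm
namespace Vorbis.Spec.sin
open X86 X86.User Asan

/-- The statement of unit `sin`. -/
def Statement : Prop :=
  ∀ (Lay : Layout) (_hLay : Lay.hi = 0x1000000) (μ : Microarch) (_hμ : UserX.MicroOK μ) (u₀ : State)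
    (_hcode : HasCodeNat Lay u₀ Vorbis.L.sin.entry Vorbis.Code.code_sin.nat Vorbis.L.sin.size)
    (_h_sincos_quadrant : ∀ (others : List Obj) (frames : List (Nat × FrameLayout)), Calls Lay μ Vorbis.WayInv (Vorbis.conv u₀) Vorbis.L.sincos_quadrant.entry (Vorbis.Spec.sincos_quadrant.spec others frames)),
    ∀ (others : List Obj) (frames : List (Nat × FrameLayout)), Calls Lay μ Vorbis.WayInv (Vorbis.conv u₀) Vorbis.L.sin.entry (Vorbis.Spec.sin.spec others frames)

end Vorbis.Spec.sin
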